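-- pv_equiv track=rewrite | github.com/QHuuT/gonogo | src/be/api/rtm.py | filter_demo_epics
-- ===== SOURCE A (Python) =====
-- from typing import List, Optional
--
-- def filter_demo_epics(
--     epics: List[dict], epic_filter: Optional[str], status_filter: Optional[str], component_filter: Optional[str]
-- ) -> List[dict]:
--     """Apply basic filtering logic to the demo epics collection."""
--     filtered = epics
--
--     if epic_filter:
--         filtered = [epic for epic in filtered if epic.get("epic_id") == epic_filter]
--
--     if status_filter:
--         status_lower = status_filter.lower()
--         filtered = [epic for epic in filtered if str(epic.get("status", "")).lower() == status_lower]
--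
--     if component_filter:
--         components = [component.strip().lower() for component in component_filter.split(",") if component.strip()]
--         if components:
--             filtered = [epic for epic in filtered if str(epic.get("component", "")).lower() in components]
--
--     return filtered
-- ===== SOURCE B (Python) =====
-- def filter_demo_epics(epics, epic_filter, status_filter, component_filter):
--     """One-pass re-implementation: precompute the filter invariants once,
--     then keep each epic with a single predicate (early-return style)."""
--     status_lower = status_filter.lower() if status_filter else None
--     components = []
--     if component_filter:
--         components = [c.strip().lower() for c in component_filter.split(",") if c.strip()]
--
--     def keep(epic):
--         if epic_filter and epic.get("epic_id") != epic_filter: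
--             return False
--         if status_lower is not None and str(epic.get("status", "")).lower() != status_lower:
--             return False
--         if components and str(epic.get("component", "")).lower() not in components:
--             return False
--         return True
--
--     return [epic for epic in epics if keep(epic)]
-- ===== Notes on version B (the rewrite author's own statement) =====
-- stated objective: simpler
-- what changed: Replaces the three sequential list-rebuilding passes by precomputing the filter invariants once and a single pass over epics with one early-return keep predicate.
import Mathlib
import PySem

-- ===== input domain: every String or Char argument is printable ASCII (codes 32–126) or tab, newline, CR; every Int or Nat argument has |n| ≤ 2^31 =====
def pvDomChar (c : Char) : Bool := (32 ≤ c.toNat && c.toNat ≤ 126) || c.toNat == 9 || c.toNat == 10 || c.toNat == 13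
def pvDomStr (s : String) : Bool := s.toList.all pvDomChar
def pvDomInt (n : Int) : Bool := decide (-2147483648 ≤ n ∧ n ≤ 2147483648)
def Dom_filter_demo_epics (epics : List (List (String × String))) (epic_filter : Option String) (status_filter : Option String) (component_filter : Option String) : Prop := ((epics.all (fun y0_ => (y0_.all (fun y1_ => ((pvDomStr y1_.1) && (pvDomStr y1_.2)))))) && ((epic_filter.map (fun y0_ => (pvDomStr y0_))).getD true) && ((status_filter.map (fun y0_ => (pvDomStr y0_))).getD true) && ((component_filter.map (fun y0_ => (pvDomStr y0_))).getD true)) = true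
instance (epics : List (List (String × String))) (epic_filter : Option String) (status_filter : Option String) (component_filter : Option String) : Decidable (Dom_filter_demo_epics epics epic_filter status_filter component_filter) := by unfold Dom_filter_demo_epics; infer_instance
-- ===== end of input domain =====

-- B replaces A's three sequential list-rebuilding filter passes by precomputing the filter
-- invariants once and doing a single pass with one early-return keep predicate (objective: simpler).


-- ===== PORT A =====
-- first-match lookup on the association-list dict (Python dict.get)
def pvGet (d : List (String × String)) (k : String) : Option String :=
  (d.find? (fun p => p.1 == k)).map (fun p => p.2)

def pvGetD (d : List (String × String)) (k : String) (dflt : String) : String :=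
  (pvGet d k).getD dflt

-- Python truthiness of an Optional[str]
def pvTruthy (o : Option String) : Bool :=
  match o with
  | none => false
  | some s => !(s == "")

-- [c.strip().lower() for c in cf.split(",") if c.strip()]  (identical comprehension in both Pythons)
def pvComponents (cf : String) : List String :=
  -- split? is always `some` here since the separator "," is nonempty
  (((PySem.Str.split? cf ",").getD []).filter (fun c => !(PySem.Str.strip c == ""))).map
    (fun c => PySem.Str.lower (PySem.Str.strip c))

def filter_demo_epics (epics : List (List (String × String))) (epic_filter : Option String) (status_filter : Option String) (component_filter : Option String) : List (List (String × String)) :=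
  let filtered := epics
  let filtered :=
    if pvTruthy epic_filter then
      filtered.filter (fun epic => pvGet epic "epic_id" == epic_filter)
    else filtered
  let filtered :=
    match status_filter with
    | some s =>
      if !(s == "") then
        let statusLower := PySem.Str.lower s
        filtered.filter (fun epic => PySem.Str.lower (pvGetD epic "status" "") == statusLower)
      else filtered
    | none => filtered
  let filtered :=
    match component_filter with
    | some c =>
      if !(c == "") then
        let components := pvComponents c
        if !components.isEmpty then
          filtered.filter (fun epic => components.contains (PySem.Str.lower (pvGetD epic "component" "")))
        else filtered
      else filtered
    | none => filtered
  filtered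

-- ===== PORT B =====
-- B's keep(epic): early-return chain over the precomputed invariants
def pvKeep (epic_filter : Option String) (statusLower : Option String) (components : List String) (epic : List (String × String)) : Bool :=
  if pvTruthy epic_filter && !(pvGet epic "epic_id" == epic_filter) then false
  else if (match statusLower with
           | some t => !(PySem.Str.lower (pvGetD epic "status" "") == t)
           | none => false) then false
  else if !components.isEmpty && !(components.contains (PySem.Str.lower (pvGetD epic "component" ""))) then false
  else true

def filter_demo_epics_alt (epics : List (List (String × String))) (epic_filter : Option String) (status_filter : Option String) (component_filter : Option String) : List (List (String × String)) :=
  let statusLower : Option String :=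
    match status_filter with
    | some s => if !(s == "") then some (PySem.Str.lower s) else none
    | none => none
  let components : List String :=
    match component_filter with
    | some c => if !(c == "") then pvComponents c else []
    | none => []
  epics.filter (pvKeep epic_filter statusLower components)

-- ===== PRECONDITION & SPEC =====
def Spec_filter_demo_epics (epics : List (List (String × String))) (epic_filter : Option String) (status_filter : Option String) (component_filter : Option String) (out : List (List (String × String))) : Prop := out = filter_demo_epics_alt epics epic_filter status_filter component_filter
instance (epics : List (List (String × String))) (epic_filter : Option String) (status_filter : Option String) (component_filter : Option String) (out : List (List (String × String))) : Decidable (Spec_filter_demo_epics epics epic_filter status_filter component_filter out) := by unfold Spec_filter_demo_epics; infer_instance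

-- ===== CLAIM (what is proved, stated in full; the proofs are below) =====
def Claim_equal_filter_demo_epics : Prop := ∀ (epics : List (List (String × String))) (epic_filter : Option String) (status_filter : Option String) (component_filter : Option String), Dom_filter_demo_epics epics epic_filter status_filter component_filter → Spec_filter_demo_epics epics epic_filter status_filter component_filter (filter_demo_epics epics epic_filter status_filter component_filter)

-- ===== LEMMAS AND PROOFS =====

-- ===== VERDICT (by name: the statement is the Claim_ definition above) =====
-- pointwise equality of A's fused predicate and B's keep predicate
theorem keep_eq (ef sl : Option String) (comps : List String) (epic : List (String × String)) :
    pvKeep ef sl comps epic =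
      ((!pvTruthy ef || pvGet epic "epic_id" == ef) &&
       (match sl with | some t => PySem.Str.lower (pvGetD epic "status" "") == t | none => true) &&
       (comps.isEmpty || comps.contains (PySem.Str.lower (pvGetD epic "component" "")))) := by
  unfold pvKeep
  cases hef : pvTruthy ef <;>
  cases h1 : pvGet epic "epic_id" == ef <;>
  rcases sl with _ | t <;>
  cases hc : comps.isEmpty <;>
  cases h3 : comps.contains (PySem.Str.lower (pvGetD epic "component" "")) <;>
  simp <;>
  cases h2 : PySem.Str.lower (pvGetD epic "status" "") == t <;> simp_all

theorem pv_filter_ext {a : Type} (l : List a) (p q : a → Bool) (h : ∀ x, p x = q x) :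
    l.filter p = l.filter q := by
  simp [funext h]

theorem pv_filter_true {a : Type} (l : List a) (q : a → Bool) (h : ∀ x, q x = true) :
    l = l.filter q := by
  simp [funext h]

theorem filter_demo_epics_spec : Claim_equal_filter_demo_epics := by
  intro epics ef sf cf _
  unfold Spec_filter_demo_epics filter_demo_epics filter_demo_epics_alt
  rcases sf with _ | s <;> rcases cf with _ | c <;> cases hef : pvTruthy ef <;>
    simp only [Bool.false_eq_true, if_false, if_true] <;>
    (try split_ifs) <;>
    (try simp only [List.filter_filter]) <;>
    first
      | (apply pv_filter_true; intro epic; rw [keep_eq, Bool.eq_iff_iff]; simp_all)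
      | (apply pv_filter_ext; intro epic; rw [keep_eq, Bool.eq_iff_iff]; simp_all <;> tauto)
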